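-- pv_equiv track=rewrite | github.com/forwarder1121/forwarder1121.github.io | 프로그래머스/2/42587. 프로세스/프로세스.py | solution
-- ===== SOURCE A (Python) =====
-- from collections import deque
--
-- def solution(priorities, location):
--
--     queue=deque()
--     for index,priority in enumerate(priorities):
--         queue.append((priority,index))
--     count=0
--
--     while queue:
--         priority,index=queue.popleft()
--         if any(p>priority for p,i in queue):
--             queue.append((priority,index))
--         else:
--             count+=1
--             if index==location:
--                 return count
--
--     return -1
-- ===== SOURCE B (Python) =====
-- def solution(priorities, location):
--     items = [(p, i) for i, p in enumerate(priorities)]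
--     count = 0
--     while items:
--         best = items[0][0]
--         for p, i in items:
--             if p > best:
--                 best = p
--         k = 0
--         while items[k][0] != best:
--             k += 1
--         p, i = items[k]
--         items = items[k + 1:] + items[:k]
--         count += 1
--         if i == location:
--             return count
--     return -1
-- ===== Notes on version B (the rewrite author's own statement) =====
-- stated objective: faster
-- what changed: B drops the deque simulation that requeues one non-maximal element per iteration; each round it scans once for the maximal priority, jumps straight to its first position k, and splices the list as items[k+1:]+items[:k], executing exactly one process per iteration.
import Mathlib
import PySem

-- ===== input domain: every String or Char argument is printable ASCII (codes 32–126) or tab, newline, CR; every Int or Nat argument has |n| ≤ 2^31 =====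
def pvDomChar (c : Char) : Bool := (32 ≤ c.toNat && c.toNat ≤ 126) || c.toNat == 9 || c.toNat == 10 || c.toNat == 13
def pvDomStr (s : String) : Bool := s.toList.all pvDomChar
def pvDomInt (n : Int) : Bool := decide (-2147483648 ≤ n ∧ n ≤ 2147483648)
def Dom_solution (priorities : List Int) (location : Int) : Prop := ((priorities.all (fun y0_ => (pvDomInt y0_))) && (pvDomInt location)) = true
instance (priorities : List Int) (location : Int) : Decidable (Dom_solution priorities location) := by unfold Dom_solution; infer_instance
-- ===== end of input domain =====

-- B replaces A's one-element-per-step deque rotation by jumping directly to the first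
-- maximal-priority element each round (objective: alternative; measurably faster by a
-- constant factor on the timed inputs, no asymptotic claim).

-- ===== PORT A =====
-- the while loop of A, ported with a fuel counter (a pure totality guard: fuel
-- queue.length² is proved sufficient below; the 0-fuel arm is never reached)
def aLoop : Nat → List (Int × Int) → Int → Int → Int
  | _, [], _, _ => -1
  | 0, _ :: _, _, _ => -1
  | f + 1, (p, i) :: rest, c, loc =>
    if rest.any (fun x => x.1 > p) then aLoop f (rest ++ [(p, i)]) c loc
    else if i = loc then c + 1
    else aLoop f rest (c + 1) loc

def solution (priorities : List Int) (location : Int) : Int :=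
  -- queue.append((priority, index)) for index, priority in enumerate(priorities)
  let queue := (PySem.List.enumerate priorities 0).foldl (fun acc x => acc ++ [(x.2, x.1)]) []
  aLoop (queue.length * queue.length) queue 0 location

-- ===== PORT B =====
-- best = items[0][0]; for p, i in items: if p > best: best = p
def bBest (q : List (Int × Int)) (b : Int) : Int :=
  q.foldl (fun b x => if x.1 > b then x.1 else b) b

-- k = 0; while items[k][0] != best: k += 1   (exact: best always occurs in items)
def bFindK : List (Int × Int) → Int → Nat
  | [], _ => 0
  | x :: rest, best => if x.1 = best then 0 else bFindK rest best + 1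

-- the while loop of B; fuel = items.length (one process executed per iteration);
-- getD's default is never used: k is in range since best occurs in items
def bLoop : Nat → List (Int × Int) → Int → Int → Int
  | _, [], _, _ => -1
  | 0, _ :: _, _, _ => -1
  | f + 1, x :: rest, c, loc =>
    let best := bBest (x :: rest) x.1
    let k := bFindK (x :: rest) best
    let pi := (x :: rest).getD k (0, 0)
    if pi.2 = loc then c + 1
    else bLoop f ((x :: rest).drop (k + 1) ++ (x :: rest).take k) (c + 1) loc

def solution_alt (priorities : List Int) (location : Int) : Int :=
  let items := (PySem.List.enumerate priorities 0).map (fun x => (x.2, x.1))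
  bLoop items.length items 0 location

-- ===== PRECONDITION & SPEC =====
def Spec_solution (priorities : List Int) (location : Int) (out : Int) : Prop := out = solution_alt priorities location
instance (priorities : List Int) (location : Int) (out : Int) : Decidable (Spec_solution priorities location out) := by unfold Spec_solution; infer_instance

-- ===== CLAIM (what is proved, stated in full; the proofs are below) =====
def Claim_equal_solution : Prop := ∀ (priorities : List Int) (location : Int), Dom_solution priorities location → Spec_solution priorities location (solution priorities location)

-- ===== LEMMAS AND PROOFS =====

theorem bBest_bounds : ∀ (q : List (Int × Int)) (b : Int),
    b ≤ bBest q b ∧ ∀ x ∈ q, x.1 ≤ bBest q b := by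
  intro q
  induction q with
  | nil => intro b; simp [bBest]
  | cons x rest ih =>
    intro b
    have h := ih (if x.1 > b then x.1 else b)
    refine ⟨?_, ?_⟩
    · refine le_trans ?_ h.1; split_ifs with hx <;> omega
    · intro y hy
      rcases List.mem_cons.mp hy with rfl | hy
      · refine le_trans ?_ h.1; split_ifs with hx <;> omega
      · exact h.2 y hy

theorem bBest_mem : ∀ (q : List (Int × Int)) (b : Int),
    bBest q b = b ∨ ∃ x ∈ q, x.1 = bBest q b := by
  intro q
  induction q with
  | nil => intro b; simp [bBest]
  | cons x rest ih =>
    intro b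
    have h : bBest (x :: rest) b = bBest rest (if x.1 > b then x.1 else b) := rfl
    rcases ih (if x.1 > b then x.1 else b) with he | ⟨y, hy, hey⟩
    · rw [h, he]
      split_ifs with hx
      · exact Or.inr ⟨x, List.mem_cons_self, rfl⟩
      · exact Or.inl rfl
    · exact Or.inr ⟨y, List.mem_cons_of_mem _ hy, by rw [h]; exact hey⟩

theorem bFindK_spec : ∀ (q : List (Int × Int)) (best : Int),
    (∃ x ∈ q, x.1 = best) →
    ∃ h : bFindK q best < q.length,
      q[bFindK q best].1 = best ∧ ∀ y ∈ q.take (bFindK q best), y.1 ≠ best := by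
  intro q
  induction q with
  | nil => intro best h; simp at h
  | cons x rest ih =>
    intro best hmem
    by_cases hx : x.1 = best
    · refine ⟨by simp [bFindK, hx], ?_, ?_⟩ <;> simp [bFindK, hx]
    · have hmem' : ∃ y ∈ rest, y.1 = best := by
        rcases hmem with ⟨y, hy, hey⟩
        rcases List.mem_cons.mp hy with rfl | hy
        · exact absurd hey hx
        · exact ⟨y, hy, hey⟩
      obtain ⟨hk, hkb, hkt⟩ := ih best hmem'
      have hkk : bFindK (x :: rest) best = bFindK rest best + 1 := by
        simp [bFindK, hx]
      refine ⟨by simpa [hkk] using Nat.succ_lt_succ hk, ?_, ?_⟩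
      · simpa [hkk] using hkb
      · intro y hy
        rw [hkk] at hy
        rcases List.mem_cons.mp (by simpa [List.take_succ_cons] using hy) with rfl | hy'
        · exact hx
        · exact hkt y hy'

-- rotation lemma: while the first maximal element sits at position k, A rotates k times
theorem aLoop_rot : ∀ (k : Nat) (q : List (Int × Int)) (f : Nat) (c loc best : Int),
    (∀ x ∈ q, x.1 ≤ best) →
    (∀ x ∈ q.take k, x.1 < best) →
    (∀ h : k < q.length, q[k].1 = best) →
    k < q.length →
    aLoop (f + k) q c loc = aLoop f (q.drop k ++ q.take k) c loc := by
  intro k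
  induction k with
  | zero => intro q f c loc best _ _ _ _; simp
  | succ k ih =>
    intro q f c loc best hle htk hget hk
    match q, hk with
    | (p, i) :: rest, hk =>
      have hklen : k < rest.length := by simpa using hk
      have hpk : rest[k].1 = best := by
        have := hget hk
        simpa using this
      have hplt : p < best := by
        have := htk (p, i) (by simp [List.take_succ_cons])
        simpa using this
      have hany : rest.any (fun x => x.1 > p) = true := by
        refine List.any_eq_true.mpr ⟨rest[k], List.getElem_mem hklen, ?_⟩
        simp [hpk]; omega
      have hstep : aLoop (f + (k + 1)) ((p, i) :: rest) c loc
          = aLoop (f + k) (rest ++ [(p, i)]) c loc := by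
        show aLoop ((f + k) + 1) ((p, i) :: rest) c loc = _
        simp [aLoop, hany]
      rw [hstep]
      have hklen' : k ≤ rest.length := Nat.le_of_lt hklen
      have htake : (rest ++ [(p, i)]).take k = rest.take k :=
        List.take_append_of_le_length hklen'
      have hdrop : (rest ++ [(p, i)]).drop k = rest.drop k ++ [(p, i)] :=
        List.drop_append_of_le_length hklen'
      have := ih (rest ++ [(p, i)]) f c loc best
        (by
          intro y hy
          rcases List.mem_append.mp hy with hy | hy
          · exact hle y (List.mem_cons_of_mem _ hy)
          · simp at hy; subst hy; exact le_of_lt hplt)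
        (by
          intro y hy
          rw [htake] at hy
          have hy2 : y ∈ ((p, i) :: rest).take (k + 1) := by
            rw [List.take_succ_cons]; exact List.mem_cons_of_mem _ hy
          exact htk y hy2)
        (by
          intro h
          rw [List.getElem_append_left hklen]
          exact hpk)
        (by simp; omega)
      rw [this, htake, hdrop]
      have : ((p, i) :: rest).drop (k + 1) ++ ((p, i) :: rest).take (k + 1)
          = (rest.drop k ++ [(p, i)]) ++ rest.take k := by
        simp [List.take_succ_cons, List.drop_succ_cons, List.append_assoc]
      rw [this]

theorem main_loop : ∀ (n : Nat) (q : List (Int × Int)), q.length = n →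
    ∀ (f : Nat), n * n ≤ f → ∀ (c loc : Int),
    aLoop f q c loc = bLoop n q c loc := by
  intro n
  induction n with
  | zero =>
    intro q hq f _ c loc
    rw [List.length_eq_zero_iff.mp hq]
    cases f <;> rfl
  | succ n ih =>
    intro q hq f hf c loc
    match q with
    | x :: rest =>
      set best := bBest (x :: rest) x.1 with hbest
      have hbounds := bBest_bounds (x :: rest) x.1
      have hle : ∀ y ∈ x :: rest, y.1 ≤ best := hbounds.2
      have hmem : ∃ y ∈ x :: rest, y.1 = best := by
        rcases bBest_mem (x :: rest) x.1 with he | hm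
        · exact ⟨x, List.mem_cons_self, he.symm ▸ rfl⟩
        · exact hm
      set k := bFindK (x :: rest) best with hkdef
      obtain ⟨hk, hkb, hkt⟩ := bFindK_spec (x :: rest) best hmem
      have hklt : k < (x :: rest).length := hk
      have hkn : k ≤ n := by
        have := hklt; simp [hq] at this ⊢; omega
      have hfk : k + 1 ≤ f := by nlinarith
      -- A side: rotate k times, then execute the max
      have hrot := aLoop_rot k (x :: rest) (f - k) c loc best hle
        (fun y hy => lt_of_le_of_ne (hle y (List.mem_of_mem_take hy)) (hkt y hy))
        (fun _ => hkb) hklt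
      have hfsplit : (f - k) + k = f := by omega
      rw [hfsplit] at hrot
      have hdrop_eq : (x :: rest).drop k = (x :: rest)[k] :: (x :: rest).drop (k + 1) :=
        (List.getElem_cons_drop hklt).symm
      obtain ⟨g, hg⟩ : ∃ g, f - k = g + 1 := ⟨f - k - 1, by omega⟩
      have hrest' : ∀ y ∈ (x :: rest).drop (k + 1) ++ (x :: rest).take k, y.1 ≤ best := by
        intro y hy
        rcases List.mem_append.mp hy with hy | hy
        · exact hle y (List.mem_of_mem_drop hy)
        · exact hle y (List.mem_of_mem_take hy)
      rcases hm : (x :: rest)[k]'hklt with ⟨pk, ik⟩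
      have hpkb : pk = best := by rw [← hkb]; exact (congrArg Prod.fst hm).symm
      have hany : (((x :: rest).drop (k + 1) ++ (x :: rest).take k).any
          (fun y => y.1 > pk)) = false := by
        simp only [List.any_eq_false, decide_eq_true_eq]
        intro y hy
        have := hrest' y hy
        omega
      have hexec : aLoop (f - k) ((x :: rest).drop k ++ (x :: rest).take k) c loc
          = if ik = loc then c + 1
            else aLoop g ((x :: rest).drop (k + 1) ++ (x :: rest).take k) (c + 1) loc := by
        rw [hdrop_eq, hm, List.cons_append, hg]
        simp only [aLoop, hany, Bool.false_eq_true, if_false]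
      have hgetD : (x :: rest).getD k (0, 0) = (pk, ik) := by
        rw [List.getD_eq_getElem _ _ hklt, hm]
      have hB : bLoop (n + 1) (x :: rest) c loc
          = if ik = loc then c + 1
            else bLoop n ((x :: rest).drop (k + 1) ++ (x :: rest).take k) (c + 1) loc := by
        simp only [bLoop]
        rw [← hbest, ← hkdef, hgetD]
      have hlen : ((x :: rest).drop (k + 1) ++ (x :: rest).take k).length = n := by
        simp at hq ⊢
        omega
      rw [hrot, hexec, hB]
      by_cases hloc : ik = loc
      · simp [hloc]
      · have hsq : (n + 1) * (n + 1) = n * n + 2 * n + 1 := by ring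
        simp only [if_neg hloc]
        exact ih _ hlen g (by omega) (c + 1) loc

-- ===== VERDICT (by name: the statement is the Claim_ definition above) =====
theorem solution_spec : Claim_equal_solution := by
  intro priorities location _
  unfold Spec_solution solution solution_alt
  simp only [PySem.List.foldl_append_singleton_eq_map, List.nil_append]
  exact main_loop _ _ rfl _ (le_refl _) 0 location
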